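-- pv_equiv track=rewrite | github.com/mattapow/dodonaphy | dodonaphy/phylo.py | get_parent_id_vector
-- ===== SOURCE A (Python) =====
-- def get_parent_id_vector(peel, rooted=False):
--     """Generate vector of parent id of each node in peel.
--
--     Args:
--         peel (array): A [n-1 * 3] array where each row is [child0, child1, parent]
--
--     Returns:
--         array: The parent id of each node in the tree.
--     """
--     n_nodes = len(peel) * 2
--     if not rooted:
--         n_nodes -= 1
--
--     parent_id_vector = [0] * n_nodes
--     parent_child_dict = {}
--
--     # create trifurcation in unrooted trees
--     fake_root = peel[-1][2]
--     real_root = peel[-2][2]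
--
--     # create a dictionary of parent-child relationships
--     for child0, child1, parent in peel:
--         if not rooted and parent == fake_root:
--             parent = real_root
--         parent_child_dict[child1] = parent
--         parent_child_dict[child0] = parent
--
--     # set the parent of each internal node
--     for i in range(n_nodes):
--         if parent_id_vector[i] == 0 and i in parent_child_dict:
--             parent_id_vector[i] = parent_child_dict[i]
--
--     return parent_id_vector
-- ===== SOURCE B (Python) =====
-- def get_parent_id_vector(peel, rooted=False):
--     n_nodes = len(peel) * 2 - (0 if rooted else 1)
--     fake_root = peel[-1][2]
--     real_root = peel[-2][2]
--     parent_id_vector = [0] * n_nodes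
--     for child0, child1, parent in peel:
--         if not rooted and parent == fake_root:
--             parent = real_root
--         for c in (child1, child0):
--             if 0 <= c < n_nodes:
--                 parent_id_vector[c] = parent
--     return parent_id_vector
-- ===== Notes on version B (the rewrite author's own statement) =====
-- stated objective: simpler
-- what changed: Drops the parent-child dictionary and the separate range(n_nodes) scan: a single pass over the peel rows writes each (remapped) parent directly into the vector at child1 then child0, guarded by a bounds check, relying on last-write-wins matching the dict's overwrite semantics.
import Mathlib
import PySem

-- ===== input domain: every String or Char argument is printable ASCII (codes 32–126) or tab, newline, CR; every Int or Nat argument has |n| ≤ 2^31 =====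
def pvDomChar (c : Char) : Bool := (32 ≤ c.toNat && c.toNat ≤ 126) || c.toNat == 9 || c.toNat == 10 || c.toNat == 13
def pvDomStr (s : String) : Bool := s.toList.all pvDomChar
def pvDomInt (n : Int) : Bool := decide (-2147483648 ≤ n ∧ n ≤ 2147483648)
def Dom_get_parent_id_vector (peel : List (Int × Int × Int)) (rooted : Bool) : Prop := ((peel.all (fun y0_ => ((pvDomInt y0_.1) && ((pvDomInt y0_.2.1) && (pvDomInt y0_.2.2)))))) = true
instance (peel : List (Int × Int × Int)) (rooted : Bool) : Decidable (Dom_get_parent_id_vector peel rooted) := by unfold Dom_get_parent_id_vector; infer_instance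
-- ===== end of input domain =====

-- B replaces A's parent-child dictionary + separate range scan with one direct bounds-checked
-- pass over the peel rows writing into the vector; objective: simpler, same cost.


-- ===== PORT A =====
def get_parent_id_vector (peel : List (Int × Int × Int)) (rooted : Bool) : List Int :=
  let n_nodes : Int := (peel.length : Int) * 2
  let n_nodes : Int := if rooted then n_nodes else n_nodes - 1
  let vec0 : List Int := List.replicate n_nodes.toNat 0
  let fake_root : Int := (PySem.List.pyGetD peel (-1) (0, 0, 0)).2.2
  let real_root : Int := (PySem.List.pyGetD peel (-2) (0, 0, 0)).2.2
  let d : PySem.Dict Int Int := peel.foldl (fun d row =>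
    let parent := if !rooted && row.2.2 == fake_root then real_root else row.2.2
    (d.insert row.2.1 parent).insert row.1 parent) PySem.Dict.empty
  (PySem.List.pyRange 0 n_nodes 1).foldl (fun vec i =>
    if PySem.List.pyGetD vec i 0 = 0 ∧ (d.get? i).isSome then
      PySem.List.pySetD vec i (d.getD i 0)
    else vec) vec0

-- ===== PORT B =====
def get_parent_id_vector_alt (peel : List (Int × Int × Int)) (rooted : Bool) : List Int :=
  let n_nodes : Int := (peel.length : Int) * 2 - (if rooted then 0 else 1)
  let fake_root : Int := (PySem.List.pyGetD peel (-1) (0, 0, 0)).2.2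
  let real_root : Int := (PySem.List.pyGetD peel (-2) (0, 0, 0)).2.2
  peel.foldl (fun vec row =>
    let parent := if !rooted && row.2.2 == fake_root then real_root else row.2.2
    let vec := if 0 ≤ row.2.1 ∧ row.2.1 < n_nodes then PySem.List.pySetD vec row.2.1 parent else vec
    if 0 ≤ row.1 ∧ row.1 < n_nodes then PySem.List.pySetD vec row.1 parent else vec)
    (List.replicate n_nodes.toNat 0)

-- ===== PRECONDITION & SPEC =====
-- Pre_ excludes peel of length < 2, where Python A raises IndexError on peel[-1] / peel[-2] (B raises there too).
def Pre_get_parent_id_vector (peel : List (Int × Int × Int)) (rooted : Bool) : Prop := 2 ≤ peel.length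
instance (peel : List (Int × Int × Int)) (rooted : Bool) : Decidable (Pre_get_parent_id_vector peel rooted) := by unfold Pre_get_parent_id_vector; infer_instance
def pvWitness_get_parent_id_vector : (List (Int × Int × Int)) × Bool := ([(0, 1, 4), (4, 2, 3)], false)

def Spec_get_parent_id_vector (peel : List (Int × Int × Int)) (rooted : Bool) (out : List Int) : Prop := out = get_parent_id_vector_alt peel rooted
instance (peel : List (Int × Int × Int)) (rooted : Bool) (out : List Int) : Decidable (Spec_get_parent_id_vector peel rooted out) := by unfold Spec_get_parent_id_vector; infer_instance

-- ===== CLAIM (what is proved, stated in full; the proofs are below) =====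
def Claim_equal_get_parent_id_vector : Prop := ∀ (peel : List (Int × Int × Int)) (rooted : Bool), Dom_get_parent_id_vector peel rooted → Pre_get_parent_id_vector peel rooted → Spec_get_parent_id_vector peel rooted (get_parent_id_vector peel rooted)

-- ===== LEMMAS AND PROOFS =====

-- the parent assigned to node i by a scan of peel: later rows (and child0 over child1) win
def pvLook (fake real : Int) (rooted : Bool) : List (Int × Int × Int) → Int → Option Int
  | [], _ => none
  | row :: rest, i =>
      match pvLook fake real rooted rest i with
      | some v => some v
      | none =>
          if row.1 = i ∨ row.2.1 = i then
            some (if !rooted && row.2.2 == fake then real else row.2.2)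
          else none

-- A's dictionary lookup is pvLook (falling back to the initial dict)
theorem pvDict_get (fake real : Int) (rooted : Bool) :
    ∀ (peel : List (Int × Int × Int)) (d : PySem.Dict Int Int) (i : Int),
      (peel.foldl (fun d row =>
        let parent := if !rooted && row.2.2 == fake then real else row.2.2
        (d.insert row.2.1 parent).insert row.1 parent) d).get? i
      = match pvLook fake real rooted peel i with
        | some v => some v
        | none => d.get? i := by
  intro peel
  induction peel with
  | nil => intro d i; simp [pvLook]
  | cons row rest ih =>
    intro d i
    simp only [List.foldl_cons]
    rw [ih]
    simp only [pvLook]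
    cases h : pvLook fake real rooted rest i with
    | some v => simp
    | none =>
      simp only []
      by_cases h0 : row.1 = i
      · subst h0
        rw [PySem.Dict.get?_insert_self]
        simp
      · rw [PySem.Dict.get?_insert_of_ne _ _ (fun hc => h0 hc.symm)]
        by_cases h1 : row.2.1 = i
        · subst h1
          rw [PySem.Dict.get?_insert_self]
          simp [h0]
        · rw [PySem.Dict.get?_insert_of_ne _ _ (fun hc => h1 hc.symm)]
          simp [h0, h1]

theorem pvAlt_length (fake real : Int) (rooted : Bool) (N : Int) :
    ∀ (peel : List (Int × Int × Int)) (vec : List Int),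
      (peel.foldl (fun vec row =>
        let parent := if !rooted && row.2.2 == fake then real else row.2.2
        let vec := if 0 ≤ row.2.1 ∧ row.2.1 < N then PySem.List.pySetD vec row.2.1 parent else vec
        if 0 ≤ row.1 ∧ row.1 < N then PySem.List.pySetD vec row.1 parent else vec) vec).length
      = vec.length := by
  intro peel
  induction peel with
  | nil => intro vec; rfl
  | cons row rest ih =>
    intro vec
    simp only [List.foldl_cons]
    rw [ih]
    split_ifs <;> simp [PySem.List.length_pySetD]

-- one guarded write of B, element-wise
theorem pvStep_getD (N : Int) (vec : List Int) (hlen : vec.length = N.toNat)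
    (c : Int) (p : Int) (j : Nat) (hj : j < N.toNat) :
    (if 0 ≤ c ∧ c < N then PySem.List.pySetD vec c p else vec).getD j 0
    = if c = (j : Nat) then p else vec.getD j 0 := by
  split_ifs with h1 h2 h2
  · subst h2
    rw [PySem.List.pySetD_of_nonneg _ _ h1.1]
    simp only [Int.toNat_natCast]
    simp [List.getD_eq_getElem?_getD, hlen, hj]
  · rw [PySem.List.pySetD_of_nonneg _ _ h1.1]
    have : c.toNat ≠ j := by omega
    simp [List.getD_eq_getElem?_getD, this]
  · omega
  · rfl

theorem pvStep_length (N : Int) (vec : List Int) (c p : Int) :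
    (if 0 ≤ c ∧ c < N then PySem.List.pySetD vec c p else vec).length = vec.length := by
  split_ifs <;> simp [PySem.List.length_pySetD]

-- B's fold, element-wise, is pvLook
theorem pvAlt_get (fake real : Int) (rooted : Bool) (N : Int) :
    ∀ (peel : List (Int × Int × Int)) (vec : List Int), vec.length = N.toNat →
      ∀ (j : Nat), j < N.toNat →
        (peel.foldl (fun vec row =>
          let parent := if !rooted && row.2.2 == fake then real else row.2.2
          let vec := if 0 ≤ row.2.1 ∧ row.2.1 < N then PySem.List.pySetD vec row.2.1 parent else vec
          if 0 ≤ row.1 ∧ row.1 < N then PySem.List.pySetD vec row.1 parent else vec) vec).getD j 0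
        = match pvLook fake real rooted peel (j : Int) with
          | some v => v
          | none => vec.getD j 0 := by
  intro peel
  induction peel with
  | nil => intro vec _ j _; simp [pvLook]
  | cons row rest ih =>
    intro vec hlen j hj
    simp only [List.foldl_cons]
    have hlen1 : (if 0 ≤ row.2.1 ∧ row.2.1 < N then PySem.List.pySetD vec row.2.1 (if !rooted && row.2.2 == fake then real else row.2.2) else vec).length = N.toNat := by
      rw [pvStep_length]; exact hlen
    have hlen2 : (if 0 ≤ row.1 ∧ row.1 < N then PySem.List.pySetD (if 0 ≤ row.2.1 ∧ row.2.1 < N then PySem.List.pySetD vec row.2.1 (if !rooted && row.2.2 == fake then real else row.2.2) else vec) row.1 (if !rooted && row.2.2 == fake then real else row.2.2) else (if 0 ≤ row.2.1 ∧ row.2.1 < N then PySem.List.pySetD vec row.2.1 (if !rooted && row.2.2 == fake then real else row.2.2) else vec)).length = N.toNat := by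
      rw [pvStep_length]; exact hlen1
    rw [ih _ hlen2 j hj]
    cases h : pvLook fake real rooted rest (j : Int) with
    | some v => simp [pvLook, h]
    | none =>
      simp only [pvLook, h]
      rw [pvStep_getD N _ hlen1 _ _ j hj, pvStep_getD N _ hlen _ _ j hj]
      by_cases h0 : row.1 = (j : Int) <;> by_cases h1 : row.2.1 = (j : Int) <;>
        simp [h0, h1]

theorem pvRange_length (d : PySem.Dict Int Int) (l : List Int) :
    ∀ (vec : List Int),
      (l.foldl (fun vec i =>
        if PySem.List.pyGetD vec i 0 = 0 ∧ (d.get? i).isSome then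
          PySem.List.pySetD vec i (d.getD i 0)
        else vec) vec).length = vec.length := by
  induction l with
  | nil => intro vec; rfl
  | cons x rest ih =>
    intro vec
    simp only [List.foldl_cons]
    rw [ih]
    split_ifs <;> simp [PySem.List.length_pySetD]

-- A's range loop over an all-zero suffix reads the dictionary straight out
theorem pvRange_get (d : PySem.Dict Int Int) (N : Int) :
    ∀ (k : Nat) (a : Int), 0 ≤ a → a + k = N →
      ∀ (vec : List Int), vec.length = N.toNat →
        (∀ (j : Nat), a ≤ (j : Int) → j < N.toNat → vec.getD j 0 = 0) →
        ∀ (j : Nat), j < N.toNat →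
          ((PySem.List.pyRange a N 1).foldl (fun vec i =>
            if PySem.List.pyGetD vec i 0 = 0 ∧ (d.get? i).isSome then
              PySem.List.pySetD vec i (d.getD i 0)
            else vec) vec).getD j 0
          = if (j : Int) < a then vec.getD j 0
            else match d.get? (j : Int) with | some v => v | none => 0 := by
  intro k
  induction k with
  | zero =>
    intro a ha hN vec hlen hzero j hj
    rw [PySem.List.pyRange_one_eq_nil (by omega)]
    simp only [List.foldl_nil]
    rw [if_pos (by omega)]
  | succ k ih =>
    intro a ha hN vec hlen hzero j hj
    rw [PySem.List.pyRange_one_cons (by omega)]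
    simp only [List.foldl_cons]
    have hguard : PySem.List.pyGetD vec a 0 = 0 := by
      rw [PySem.List.pyGetD_eq_getElem vec 0 ha (by simp [hlen]; omega)]
      have := hzero a.toNat (by omega) (by omega)
      rwa [List.getD_eq_getElem _ _ (by omega)] at this
    have hlen1 : (if PySem.List.pyGetD vec a 0 = 0 ∧ (d.get? a).isSome then
          PySem.List.pySetD vec a (d.getD a 0) else vec).length = N.toNat := by
      split_ifs <;> simp [PySem.List.length_pySetD, hlen]
    have hzero1 : ∀ (j : Nat), a + 1 ≤ (j : Int) → j < N.toNat →
        (if PySem.List.pyGetD vec a 0 = 0 ∧ (d.get? a).isSome then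
          PySem.List.pySetD vec a (d.getD a 0) else vec).getD j 0 = 0 := by
      intro j hj1 hj2
      split_ifs with hg
      · rw [PySem.List.pySetD_of_nonneg _ _ ha]
        have hne : a.toNat ≠ j := by omega
        simp [List.getD_eq_getElem?_getD, hne]
        rw [← List.getD_eq_getElem?_getD]
        exact hzero j (by omega) hj2
      · exact hzero j (by omega) hj2
    rw [ih (a + 1) (by omega) (by omega) _ hlen1 hzero1 j hj]
    by_cases hja : (j : Int) < a
    · rw [if_pos (by omega), if_pos hja]
      split_ifs with hg
      · rw [PySem.List.pySetD_of_nonneg _ _ ha]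
        have hne : a.toNat ≠ j := by omega
        simp [List.getD_eq_getElem?_getD, hne]
      · rfl
    · by_cases hja2 : (j : Int) = a
      · rw [if_pos (by omega), if_neg hja]
        have hjt : a.toNat = j := by omega
        split_ifs with hg
        · rw [PySem.List.pySetD_of_nonneg _ _ ha, hjt]
          rw [List.getD_eq_getElem _ _ (by simp [hlen]; omega), List.getElem_set]
          obtain ⟨-, hsome⟩ := hg
          obtain ⟨v, hv⟩ := Option.isSome_iff_exists.mp hsome
          simp only [hja2, hv, PySem.Dict.getD, Option.getD_some]
          simp
        · have hns : ¬ (d.get? a).isSome := by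
            intro hc; exact hg ⟨hguard, hc⟩
          cases hv : d.get? (j : Int) with
          | some v =>
            rw [hja2] at hv; rw [hv] at hns; simp at hns
          | none =>
            simp only []
            exact hzero j (by omega) hj
      · rw [if_neg (by omega), if_neg hja]

-- ===== VERDICT (by name: the statement is the Claim_ definition above) =====
theorem get_parent_id_vector_spec : Claim_equal_get_parent_id_vector := by
  intro peel rooted _hdom hpre
  unfold Pre_get_parent_id_vector at hpre
  unfold Spec_get_parent_id_vector
  unfold get_parent_id_vector get_parent_id_vector_alt
  simp only []
  set NA : Int := if rooted then (peel.length : Int) * 2 else (peel.length : Int) * 2 - 1 with hNA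
  set NB : Int := (peel.length : Int) * 2 - (if rooted then 0 else 1) with hNB
  have hNN : NA = NB := by cases rooted <;> simp [hNA, hNB]
  have hNpos : 0 ≤ NA := by cases rooted <;> simp [hNA] <;> omega
  set fake := (PySem.List.pyGetD peel (-1) ((0 : Int), (0 : Int), (0 : Int))).2.2 with hfake
  set real := (PySem.List.pyGetD peel (-2) ((0 : Int), (0 : Int), (0 : Int))).2.2 with hreal
  set d : PySem.Dict Int Int := peel.foldl (fun d row =>
    let parent := if !rooted && row.2.2 == fake then real else row.2.2
    (d.insert row.2.1 parent).insert row.1 parent) PySem.Dict.empty with hd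
  rw [← hNN]
  apply List.ext_getElem
  · rw [pvRange_length, pvAlt_length]
  · intro j hj1 hj2
    rw [pvRange_length] at hj1
    simp only [List.length_replicate] at hj1
    rw [← List.getD_eq_getElem _ 0, ← List.getD_eq_getElem _ 0]
    rw [pvAlt_get fake real rooted NA peel (List.replicate NA.toNat 0) (by simp) j hj1]
    rw [pvRange_get d NA NA.toNat 0 (by omega) (by omega) _ (by simp)
        (by intro j _ hj; simp [List.getD_eq_getElem?_getD, hj]) j hj1]
    rw [if_neg (by omega)]
    rw [hd, pvDict_get]
    cases h : pvLook fake real rooted peel (j : Int) with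
    | some v => simp
    | none =>
      simp only [PySem.Dict.get?_empty]
      simp [List.getD_eq_getElem?_getD, hj1]
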